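-- pv_equiv track=rewrite | github.com/su2u4-1/my_code | python/tree.py | calculate_wh
-- ===== SOURCE A (Python) =====
-- from typing import TypeVar, Callable
--
-- T = TypeVar("T")
--
-- def calculate_wh(tree_structure: dict[T, list[T]], start: T, w: int = 1, h: int = 1) -> tuple[int, int]:
--     w += len(tree_structure[start]) - 1
--     sh = 0
--     for i in tree_structure[start]:
--         if i in tree_structure:
--             sw, ssh = calculate_wh(tree_structure, i, 0, h + 1)
--             w += sw
--             sh = max(sh, ssh)
--     h = max(sh, h)
--     return w, h
-- ===== SOURCE B (Python) =====
-- def calculate_wh(tree_structure, start, w=1, h=1):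
--     # iterative breadth-first traversal by levels instead of recursion
--     level = [start]
--     depth = h
--     height = 0
--     while level:
--         height = max(height, depth)
--         next_level = []
--         for n in level:
--             children = tree_structure[n]
--             w += len(children) - 1
--             next_level.extend(c for c in children if c in tree_structure)
--         level = next_level
--         depth += 1
--     return w, height
-- ===== Notes on version B (the rewrite author's own statement) =====
-- stated objective: alternative
-- what changed: Replaced the accumulator-threaded depth-first recursion by an iterative breadth-first level loop: width is accumulated level by level and height is a running max of the level depth.
import Mathlib
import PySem

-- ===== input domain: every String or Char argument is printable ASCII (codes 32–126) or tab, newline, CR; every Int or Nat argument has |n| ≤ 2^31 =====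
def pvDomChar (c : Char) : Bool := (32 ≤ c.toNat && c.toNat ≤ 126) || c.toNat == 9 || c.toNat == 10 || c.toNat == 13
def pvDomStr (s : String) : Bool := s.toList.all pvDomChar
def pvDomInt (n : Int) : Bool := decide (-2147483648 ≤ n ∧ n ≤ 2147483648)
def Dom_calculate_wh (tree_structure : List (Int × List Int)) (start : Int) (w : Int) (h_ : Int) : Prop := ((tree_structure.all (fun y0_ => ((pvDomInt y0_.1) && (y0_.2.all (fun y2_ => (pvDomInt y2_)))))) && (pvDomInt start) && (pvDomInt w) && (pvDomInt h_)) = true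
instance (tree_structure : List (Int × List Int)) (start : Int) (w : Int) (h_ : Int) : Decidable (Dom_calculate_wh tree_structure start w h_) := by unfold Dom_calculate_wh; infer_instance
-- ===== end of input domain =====

-- B replaces A's depth-first accumulator recursion by an iterative breadth-first level loop (alternative decomposition, same cost).


-- ===== PORT A =====
-- fuel bounds only the recursion depth; under Pre_ (acyclic reachable part) depth ≤ tree.length, so fuel is never exhausted
def calculate_wh_go (tree : List (Int × List Int)) : Nat → Int → Int → Int → Int × Int
  | 0, _, w, h => (w, h)
  | fuel+1, start, w, h =>
    let cs := (PySem.Dict.mk tree).getD start []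
    let w := w + (cs.length : Int) - 1
    let acc := cs.foldl (fun (acc : Int × Int) i =>
        if (PySem.Dict.mk tree).contains i then
          let r := calculate_wh_go tree fuel i 0 (h + 1)
          (acc.1 + r.1, max acc.2 r.2)
        else acc) (w, 0)
    (acc.1, max acc.2 h)

def calculate_wh (tree_structure : List (Int × List Int)) (start : Int) (w : Int) (h_ : Int) : Int × Int :=
  calculate_wh_go tree_structure (tree_structure.length + 1) start w h_

-- ===== PORT B =====
-- fuel bounds the number of BFS levels; under Pre_ there are at most tree.length + 1 nonempty levels
def calculate_wh_alt_go (tree : List (Int × List Int)) : Nat → List Int → Int → Int → Int → Int × Int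
  | _, [], _, w, height => (w, height)
  | 0, _ :: _, _, w_, height_ => (w_, height_)
  | fuel+1, n :: rest, depth, w, height =>
    let acc := (n :: rest).foldl (fun (acc : Int × List Int) m =>
        let cs := (PySem.Dict.mk tree).getD m []
        (acc.1 + (cs.length : Int) - 1,
         acc.2 ++ cs.filter (fun c => (PySem.Dict.mk tree).contains c))) (w, [])
    calculate_wh_alt_go tree fuel acc.2 (depth + 1) acc.1 (max height depth)

def calculate_wh_alt (tree_structure : List (Int × List Int)) (start : Int) (w : Int) (h_ : Int) : Int × Int :=
  calculate_wh_alt_go tree_structure (tree_structure.length + 1) [start] h_ w 0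

-- ===== PRECONDITION & SPEC =====
-- key-children of a node: the children that are themselves keys (the only ones either program descends into)
def pvCK (tree : List (Int × List Int)) (n : Int) : List Int :=
  ((PySem.Dict.mk tree).getD n []).filter (fun c => (PySem.Dict.mk tree).contains c)

-- one step of reachability through keys (deduplicated one-step successor set)
def pvFrontier (tree : List (Int × List Int)) (s : List Int) : List Int :=
  (s.flatMap (pvCK tree)).dedup

-- Pre_ excludes exactly the inputs on which A raises: start not a key (KeyError) and a cycle reachable
-- from start (RecursionError; no walk of length tree.length + 1 exists iff the reachable part is acyclic).
def Pre_calculate_wh (tree_structure : List (Int × List Int)) (start : Int) (w' : Int) (h' : Int) : Prop :=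
  (PySem.Dict.mk tree_structure).contains start = true ∧
    (pvFrontier tree_structure)^[tree_structure.length + 1] [start] = []

instance (tree_structure : List (Int × List Int)) (start : Int) (w : Int) (h_ : Int) : Decidable (Pre_calculate_wh tree_structure start w h_) := by
  unfold Pre_calculate_wh; infer_instance

def pvWitness_calculate_wh : (List (Int × List Int)) × Int × Int × Int := ([(0, [1]), (1, [])], 0, 1, 1)

def Spec_calculate_wh (tree_structure : List (Int × List Int)) (start : Int) (w : Int) (h_ : Int) (out : Int × Int) : Prop := out = calculate_wh_alt tree_structure start w h_
instance (tree_structure : List (Int × List Int)) (start : Int) (w : Int) (h_ : Int) (out : Int × Int) : Decidable (Spec_calculate_wh tree_structure start w h_ out) := by unfold Spec_calculate_wh; infer_instance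

-- ===== CLAIM (what is proved, stated in full; the proofs are below) =====
def Claim_equal_calculate_wh : Prop := ∀ (tree_structure : List (Int × List Int)) (start : Int) (w : Int) (h_ : Int), Dom_calculate_wh tree_structure start w h_ → Pre_calculate_wh tree_structure start w h_ → Spec_calculate_wh tree_structure start w h_ (calculate_wh tree_structure start w h_)

-- ===== LEMMAS AND PROOFS =====

-- all walks of key-children from n have length ≤ d
def pvBnd (tree : List (Int × List Int)) : Nat → Int → Prop
  | 0, n => pvCK tree n = []
  | d+1, n => ∀ c ∈ pvCK tree n, pvBnd tree d c

-- the width contribution of the subtree below n (fuel-indexed)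
def pvWd (tree : List (Int × List Int)) : Nat → Int → Int
  | 0, _ => 0
  | f+1, n => (((PySem.Dict.mk tree).getD n []).length : Int) - 1 + ((pvCK tree n).map (pvWd tree f)).sum

-- the height (extra depth) of the subtree below n (fuel-indexed)
def pvHt (tree : List (Int × List Int)) : Nat → Int → Int
  | 0, _ => 0
  | f+1, n => (pvCK tree n).foldr (fun c acc => max (1 + pvHt tree f c) acc) 0

def pvMaxHt (tree : List (Int × List Int)) (f : Nat) (l : List Int) : Int :=
  l.foldr (fun n a => max (pvHt tree f n) a) 0

lemma foldr_max_nonneg (g : Int → Int) : ∀ l : List Int, 0 ≤ l.foldr (fun c a => max (g c) a) 0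
  | [] => le_refl 0
  | c :: l => by have := foldr_max_nonneg g l; simp only [List.foldr_cons]; omega

lemma pvHt_nonneg (tree : List (Int × List Int)) : ∀ f n, 0 ≤ pvHt tree f n
  | 0, _ => le_refl 0
  | f+1, n => by
    simp only [pvHt]
    exact foldr_max_nonneg _ _

lemma pvMaxHt_nonneg (tree : List (Int × List Int)) (f : Nat) (l : List Int) : 0 ≤ pvMaxHt tree f l :=
  foldr_max_nonneg _ _

lemma frontier_bnd (tree : List (Int × List Int)) :
    ∀ k (s : List Int), (pvFrontier tree)^[k+1] s = [] → ∀ n ∈ s, pvBnd tree k n := by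
  intro k
  induction k with
  | zero =>
    intro s h n hn
    rw [Function.iterate_succ_apply, Function.iterate_zero_apply] at h
    simp only [pvFrontier, List.dedup_eq_nil, List.flatMap_eq_nil_iff] at h
    exact h n hn
  | succ k ih =>
    intro s h n hn c hc
    rw [Function.iterate_succ_apply] at h
    exact ih _ h c (by
      simp only [pvFrontier, List.mem_dedup, List.mem_flatMap]
      exact ⟨n, hn, hc⟩)

lemma pvBnd_succ_of_mem {tree : List (Int × List Int)} {d : Nat} {n c : Int}
    (h : pvBnd tree d n) (hc : c ∈ pvCK tree n) : ∃ d', d' < d ∧ pvBnd tree d' c := by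
  cases d with
  | zero => simp only [pvBnd] at h; rw [h] at hc; cases hc
  | succ d => exact ⟨d, Nat.lt_succ_self d, h c hc⟩

lemma foldr_max_seed (g : Int → Int) :
    ∀ (l : List Int) (s x : Int),
      l.foldr (fun i a => max a (g i)) (max s x) = max (l.foldr (fun i a => max a (g i)) s) x := by
  intro l
  induction l with
  | nil => intro s x; rfl
  | cons i l ih => intro s x; simp only [List.foldr_cons, ih]; omega

lemma foldA_char (tree : List (Int × List Int)) (fuel : Nat) (h : Int) :
    ∀ (cs : List Int) (w0 s0 : Int),
      cs.foldl (fun (acc : Int × Int) i =>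
          if (PySem.Dict.mk tree).contains i then
            let r := calculate_wh_go tree fuel i 0 (h + 1)
            (acc.1 + r.1, max acc.2 r.2)
          else acc) (w0, s0)
      = (w0 + ((cs.filter (fun c => (PySem.Dict.mk tree).contains c)).map
                (fun i => (calculate_wh_go tree fuel i 0 (h + 1)).1)).sum,
         (cs.filter (fun c => (PySem.Dict.mk tree).contains c)).foldr
            (fun i a => max a ((calculate_wh_go tree fuel i 0 (h + 1)).2)) s0) := by
  intro cs
  induction cs with
  | nil =>
    intro w0 s0
    simp only [List.foldl_nil, List.filter_nil, List.map_nil, List.sum_nil, List.foldr_nil]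
    rw [Prod.mk.injEq]
    exact ⟨by ring, rfl⟩
  | cons i cs ih =>
    intro w0 s0
    by_cases hp : (PySem.Dict.mk tree).contains i
    · simp only [List.foldl_cons, List.filter_cons, hp, if_true, ih, List.map_cons, List.sum_cons,
        List.foldr_cons, foldr_max_seed]
      rw [Prod.mk.injEq]
      exact ⟨by ring, rfl⟩
    · simp only [List.foldl_cons, List.filter_cons, hp, ih]
      simp

lemma max_shift (g : Int → Int) (hg : ∀ i, 0 ≤ g i) :
    ∀ (l : List Int) (h : Int),
      max (l.foldr (fun i a => max a (max 0 (h + 1 + g i))) 0) h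
        = max 0 (h + l.foldr (fun c a => max (1 + g c) a) 0) := by
  intro l
  induction l with
  | nil =>
    intro h
    simp only [List.foldr_nil]
    omega
  | cons i l ih =>
    intro h
    have := ih h
    have := hg i
    have := foldr_max_nonneg (fun c => 1 + g c) l
    simp only [List.foldr_cons] at *
    omega

-- A's recursion computes width offset pvWd and height offset pvHt
lemma goA_eq (tree : List (Int × List Int)) :
    ∀ (f d : Nat) (n w h : Int), pvBnd tree d n → d < f →
      calculate_wh_go tree f n w h = (w + pvWd tree f n, max 0 (h + pvHt tree f n)) := by
  intro f
  induction f with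
  | zero => intro d n w h _ hd; omega
  | succ f ih =>
    intro d n w h hb hd
    simp only [calculate_wh_go, foldA_char]
    have hmap : ∀ i ∈ pvCK tree n,
        calculate_wh_go tree f i 0 (h + 1) = (pvWd tree f i, max 0 (h + 1 + pvHt tree f i)) := by
      intro i hi
      obtain ⟨d', hd', hb'⟩ := pvBnd_succ_of_mem hb hi
      have : d' < f := by omega
      simpa using ih d' i 0 (h + 1) hb' this
    have h1 : ((pvCK tree n).map (fun i => (calculate_wh_go tree f i 0 (h + 1)).1))
        = (pvCK tree n).map (pvWd tree f) := by
      apply List.map_congr_left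
      intro i hi; rw [hmap i hi]
    have h2 : (pvCK tree n).foldr (fun i a => max a ((calculate_wh_go tree f i 0 (h + 1)).2)) 0
        = (pvCK tree n).foldr (fun i a => max a (max 0 (h + 1 + pvHt tree f i))) 0 := by
      apply List.foldr_ext
      intro i hi a
      rw [hmap i hi]
    have hw : pvWd tree (f+1) n = (((PySem.Dict.mk tree).getD n []).length : Int) - 1
        + ((pvCK tree n).map (pvWd tree f)).sum := rfl
    have hht : pvHt tree (f+1) n
        = (pvCK tree n).foldr (fun c acc => max (1 + pvHt tree f c) acc) 0 := rfl
    simp only [pvCK] at h1 h2 hw hht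
    rw [Prod.mk.injEq]
    constructor
    · rw [h1, hw]; ring
    · rw [h2, hht, max_shift (pvHt tree f) (pvHt_nonneg tree f) _ h]

lemma foldB_char (tree : List (Int × List Int)) :
    ∀ (l : List Int) (w0 : Int) (acc0 : List Int),
      l.foldl (fun (acc : Int × List Int) m =>
          let cs := (PySem.Dict.mk tree).getD m []
          (acc.1 + (cs.length : Int) - 1,
           acc.2 ++ cs.filter (fun c => (PySem.Dict.mk tree).contains c))) (w0, acc0)
      = (w0 + (l.map (fun m => (((PySem.Dict.mk tree).getD m []).length : Int) - 1)).sum,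
         acc0 ++ l.flatMap (pvCK tree)) := by
  intro l
  induction l with
  | nil => intro w0 acc0; simp
  | cons m l ih =>
    intro w0 acc0
    simp only [List.foldl_cons, ih, List.map_cons, List.sum_cons, List.flatMap_cons,
      List.append_assoc]
    refine Prod.ext ?_ rfl
    show w0 + _ - 1 + _ = w0 + _
    ring

lemma maxht_append (tree : List (Int × List Int)) (f : Nat) (a b : List Int) :
    pvMaxHt tree f (a ++ b) = max (pvMaxHt tree f a) (pvMaxHt tree f b) := by
  induction a with
  | nil =>
    have := foldr_max_nonneg (pvHt tree f) b
    simp only [List.nil_append, pvMaxHt, List.foldr_nil]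
    omega
  | cons n a ih =>
    simp only [List.cons_append, pvMaxHt, List.foldr_cons] at *
    rw [ih]
    omega

lemma ht_node_eq (g : Int → Int) (hg : ∀ i, 0 ≤ g i) :
    ∀ (l : List Int), l ≠ [] →
      l.foldr (fun c a => max (1 + g c) a) 0 = 1 + l.foldr (fun c a => max (g c) a) 0 := by
  intro l
  induction l with
  | nil => intro h; exact absurd rfl h
  | cons c l ih =>
    intro _
    cases l with
    | nil => have := hg c; simp only [List.foldr_cons, List.foldr_nil]; omega
    | cons c' l' =>
      have h1 := ih (by simp)
      have h2 := foldr_max_nonneg g (c' :: l')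
      simp only [List.foldr_cons] at *
      omega

lemma maxht_zero_of_flatMap_nil (tree : List (Int × List Int)) (f : Nat) :
    ∀ (l : List Int), l.flatMap (pvCK tree) = [] → pvMaxHt tree (f+1) l = 0 := by
  intro l
  induction l with
  | nil => intro _; rfl
  | cons n l ih =>
    intro h
    simp only [List.flatMap_cons, List.append_eq_nil_iff] at h
    have hn : pvHt tree (f+1) n = 0 := by rw [pvHt, h.1]; rfl
    simp only [pvMaxHt, List.foldr_cons] at *
    rw [ih h.2, hn]
    omega

lemma maxht_step (tree : List (Int × List Int)) (f : Nat) :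
    ∀ (level : List Int), level.flatMap (pvCK tree) ≠ [] →
      pvMaxHt tree (f+1) level = 1 + pvMaxHt tree f (level.flatMap (pvCK tree)) := by
  intro level
  induction level with
  | nil => intro h; exact absurd rfl h
  | cons n rest ih =>
    intro h
    have e1 : pvMaxHt tree (f+1) (n :: rest)
        = max (pvHt tree (f+1) n) (pvMaxHt tree (f+1) rest) := rfl
    simp only [List.flatMap_cons] at h ⊢
    by_cases hck : pvCK tree n = []
    · have hrest : rest.flatMap (pvCK tree) ≠ [] := by
        intro hr; exact h (by rw [hck, hr]; rfl)
      have hn : pvHt tree (f+1) n = 0 := by rw [pvHt, hck]; rfl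
      have hpos := pvMaxHt_nonneg tree f (rest.flatMap (pvCK tree))
      rw [e1, hn, ih hrest, hck, List.nil_append]
      omega
    · have hn : pvHt tree (f+1) n = 1 + pvMaxHt tree f (pvCK tree n) := by
        rw [pvHt]
        exact ht_node_eq (pvHt tree f) (pvHt_nonneg tree f) _ hck
      by_cases hrest : rest.flatMap (pvCK tree) = []
      · have hz := maxht_zero_of_flatMap_nil tree f rest hrest
        have hpos := pvMaxHt_nonneg tree f (pvCK tree n)
        rw [e1, hn, hz, hrest, List.append_nil]
        omega
      · have hpos1 := pvMaxHt_nonneg tree f (pvCK tree n)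
        have hpos2 := pvMaxHt_nonneg tree f (rest.flatMap (pvCK tree))
        rw [e1, hn, ih hrest, maxht_append]
        omega

lemma sum_wd_flatMap (tree : List (Int × List Int)) (f : Nat) :
    ∀ (l : List Int),
      ((l.flatMap (pvCK tree)).map (pvWd tree f)).sum
        = (l.map (fun n => ((pvCK tree n).map (pvWd tree f)).sum)).sum := by
  intro l
  induction l with
  | nil => rfl
  | cons n l ih => simp [List.flatMap_cons, List.map_append, List.sum_append, ih]

-- B's level loop computes the same width sum and the depth of the deepest level
lemma goB_eq (tree : List (Int × List Int)) :
    ∀ (f : Nat) (level : List Int) (dep w hgt : Int),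
      level ≠ [] → (∀ n ∈ level, ∃ d, d < f ∧ pvBnd tree d n) →
      calculate_wh_alt_go tree f level dep w hgt
        = (w + (level.map (pvWd tree f)).sum, max hgt (dep + pvMaxHt tree f level)) := by
  intro f
  induction f with
  | zero =>
    intro level dep w hgt hne hb
    cases level with
    | nil => exact absurd rfl hne
    | cons n rest =>
      obtain ⟨d, hd, _⟩ := hb n (by simp)
      omega
  | succ f ih =>
    intro level dep w hgt hne hb
    cases level with
    | nil => exact absurd rfl hne
    | cons n rest =>
      simp only [calculate_wh_alt_go, foldB_char, List.nil_append]
      have hnextmem : ∀ c ∈ (n :: rest).flatMap (pvCK tree), ∃ d, d < f ∧ pvBnd tree d c := by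
        intro c hc
        rw [List.mem_flatMap] at hc
        obtain ⟨m, hm, hcm⟩ := hc
        obtain ⟨d, hd, hbd⟩ := hb m hm
        obtain ⟨d', hd', hbd'⟩ := pvBnd_succ_of_mem hbd hcm
        exact ⟨d', by omega, hbd'⟩
      have hwd : ((n :: rest).map (pvWd tree (f+1))).sum
          = ((n :: rest).map (fun m => (((PySem.Dict.mk tree).getD m []).length : Int) - 1)).sum
            + (((n :: rest).flatMap (pvCK tree)).map (pvWd tree f)).sum := by
        rw [sum_wd_flatMap]
        rw [List.map_congr_left (l := n :: rest) (f := pvWd tree (f+1))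
          (g := fun m => ((((PySem.Dict.mk tree).getD m []).length : Int) - 1)
            + ((pvCK tree m).map (pvWd tree f)).sum) (fun m _ => rfl)]
        rw [PySem.List.sum_map_add_int]
      by_cases hnext : (n :: rest).flatMap (pvCK tree) = []
      · rw [hnext]
        rw [show ∀ w' h', calculate_wh_alt_go tree f [] (dep + 1) w' h' = (w', h') from by
          intro w' h'; cases f <;> rfl]
        rw [maxht_zero_of_flatMap_nil tree f _ hnext]
        rw [Prod.mk.injEq]
        constructor
        · rw [hwd, hnext]
          simp only [List.map_nil, List.sum_nil]
          ring
        · omega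
      · rw [ih _ (dep + 1) _ (max hgt dep) hnext hnextmem]
        rw [maxht_step tree f _ hnext]
        have := pvMaxHt_nonneg tree f ((n :: rest).flatMap (pvCK tree))
        rw [Prod.mk.injEq]
        constructor
        · rw [hwd]; ring
        · omega

-- ===== VERDICT (by name: the statement is the Claim_ definition above) =====
theorem calculate_wh_spec : Claim_equal_calculate_wh := by
  intro tree start w h_ _ hpre
  obtain ⟨_, hiter⟩ := hpre
  have hb : pvBnd tree tree.length start :=
    frontier_bnd tree tree.length [start] hiter start (by simp)
  unfold Spec_calculate_wh calculate_wh calculate_wh_alt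
  rw [goA_eq tree (tree.length + 1) tree.length start w h_ hb (by omega)]
  rw [goB_eq tree (tree.length + 1) [start] h_ w 0 (by simp)
    (fun n hn => ⟨tree.length, by omega, by rw [List.mem_singleton] at hn; rw [hn]; exact hb⟩)]
  have := pvHt_nonneg tree (tree.length + 1) start
  have h1 : ([start].map (pvWd tree (tree.length + 1))).sum = pvWd tree (tree.length + 1) start := by
    simp
  have h2 : pvMaxHt tree (tree.length + 1) [start] = pvHt tree (tree.length + 1) start := by
    simp only [pvMaxHt, List.foldr_cons, List.foldr_nil]
    omega
  rw [h1, h2]
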